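-- pv_equiv track=rewrite | github.com/quentinrf/Dynamic-Change-Making-Algorithm | change_making.py | getCoins
-- ===== SOURCE A (Python) =====
-- coin_set = [1, 4, 9]
--
-- def getCoins(target):
--     coins = []
--
--     while(target>=coin_set[2]):
--         coins.append(str(coin_set[2]))
--         target = target - coin_set[2]
--     while(target>=coin_set[1]):
--         coins.append(str(coin_set[1]))
--         target = target - coin_set[1]
--     coins.append(str(target*coin_set[0]))
--     return coins
-- ===== SOURCE B (Python) =====
-- def getCoins(target):
--     n9 = max(target, 0) // 9
--     rem = target - 9 * n9
--     n4 = max(rem, 0) // 4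
--     rem2 = rem - 4 * n4
--     return ['9'] * n9 + ['4'] * n4 + [str(rem2)]
-- ===== Notes on version B (the rewrite author's own statement) =====
-- stated objective: simpler
-- what changed: Replaces the two repeated-subtraction while-loops with closed-form coin counts (floor division clamped at zero) and builds the list by replication.
import Mathlib
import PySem

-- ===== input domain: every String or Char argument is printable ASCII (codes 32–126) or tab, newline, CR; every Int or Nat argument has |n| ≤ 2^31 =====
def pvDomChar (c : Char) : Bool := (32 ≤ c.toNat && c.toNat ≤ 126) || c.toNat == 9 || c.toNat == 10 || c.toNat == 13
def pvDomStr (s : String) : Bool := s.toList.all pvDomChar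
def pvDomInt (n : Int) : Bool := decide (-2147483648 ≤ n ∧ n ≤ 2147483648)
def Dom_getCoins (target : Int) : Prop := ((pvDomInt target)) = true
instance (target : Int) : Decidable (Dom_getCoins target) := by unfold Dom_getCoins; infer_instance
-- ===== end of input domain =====

-- B replaces the two repeated-subtraction while-loops of A by closed-form coin
-- counts (floor division clamped at zero) and list replication; objective: simpler.


-- ===== PORT A =====
-- while(target >= 9): coins.append('9'); target -= 9
def getCoinsLoop9 (target : Int) (coins : List String) : List String × Int :=
  if 9 ≤ target then getCoinsLoop9 (target - 9) (coins ++ ["9"]) else (coins, target)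
termination_by target.toNat
decreasing_by omega

-- while(target >= 4): coins.append('4'); target -= 4
def getCoinsLoop4 (target : Int) (coins : List String) : List String × Int :=
  if 4 ≤ target then getCoinsLoop4 (target - 4) (coins ++ ["4"]) else (coins, target)
termination_by target.toNat
decreasing_by omega

def getCoins (target : Int) : List String :=
  let r9 := getCoinsLoop9 target []
  let r4 := getCoinsLoop4 r9.2 r9.1
  r4.1 ++ [PySem.Int.toStr (r4.2 * 1)]

-- ===== PORT B =====
def getCoins_alt (target : Int) : List String :=
  let n9 := PySem.Int.floordiv (max target 0) 9
  let rem := target - 9 * n9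
  let n4 := PySem.Int.floordiv (max rem 0) 4
  let rem2 := rem - 4 * n4
  List.replicate n9.toNat "9" ++ List.replicate n4.toNat "4" ++ [PySem.Int.toStr rem2]

-- ===== PRECONDITION & SPEC =====
def Spec_getCoins (target : Int) (out : List String) : Prop := out = getCoins_alt target
instance (target : Int) (out : List String) : Decidable (Spec_getCoins target out) := by unfold Spec_getCoins; infer_instance

-- ===== CLAIM (what is proved, stated in full; the proofs are below) =====
def Claim_equal_getCoins : Prop := ∀ (target : Int), Dom_getCoins target → Spec_getCoins target (getCoins target)

-- ===== LEMMAS AND PROOFS =====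

-- Loop characterisation: the '9' loop appends exactly max(t,0)//9 nines and
-- leaves the corresponding remainder.
theorem getCoinsLoop9_spec (t : Int) (c : List String) :
    getCoinsLoop9 t c =
      (c ++ List.replicate (PySem.Int.floordiv (max t 0) 9).toNat "9",
       t - 9 * PySem.Int.floordiv (max t 0) 9) := by
  induction t, c using getCoinsLoop9.induct with
  | case1 t c h ih =>
      rw [getCoinsLoop9, if_pos h, ih]
      have hmax : max (t - 9) 0 = t - 9 := by omega
      have hmax' : max t 0 = t := by omega
      have h1 : PySem.Int.floordiv t 9 = PySem.Int.floordiv (t - 9) 9 + 1 := by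
        rw [PySem.Int.floordiv_eq_ediv_of_pos (by omega),
            PySem.Int.floordiv_eq_ediv_of_pos (by omega)]
        omega
      have h2 : 0 ≤ PySem.Int.floordiv (t - 9) 9 := by
        rw [PySem.Int.floordiv_eq_ediv_of_pos (by omega)]; omega
      rw [hmax, hmax', h1, Prod.mk.injEq]
      constructor
      · rw [List.append_assoc]
        congr 1
        have : (PySem.Int.floordiv (t - 9) 9 + 1).toNat
             = (PySem.Int.floordiv (t - 9) 9).toNat + 1 := by omega
        rw [this, List.replicate_succ]
        rfl
      · ring
  | case2 t c h =>
      rw [getCoinsLoop9, if_neg h]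
      have h0 : PySem.Int.floordiv (max t 0) 9 = 0 := by
        rw [PySem.Int.floordiv_eq_ediv_of_pos (by omega)]; omega
      rw [h0]
      simp

theorem getCoinsLoop4_spec (t : Int) (c : List String) :
    getCoinsLoop4 t c =
      (c ++ List.replicate (PySem.Int.floordiv (max t 0) 4).toNat "4",
       t - 4 * PySem.Int.floordiv (max t 0) 4) := by
  induction t, c using getCoinsLoop4.induct with
  | case1 t c h ih =>
      rw [getCoinsLoop4, if_pos h, ih]
      have hmax : max (t - 4) 0 = t - 4 := by omega
      have hmax' : max t 0 = t := by omega
      have h1 : PySem.Int.floordiv t 4 = PySem.Int.floordiv (t - 4) 4 + 1 := by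
        rw [PySem.Int.floordiv_eq_ediv_of_pos (by omega),
            PySem.Int.floordiv_eq_ediv_of_pos (by omega)]
        omega
      have h2 : 0 ≤ PySem.Int.floordiv (t - 4) 4 := by
        rw [PySem.Int.floordiv_eq_ediv_of_pos (by omega)]; omega
      rw [hmax, hmax', h1, Prod.mk.injEq]
      constructor
      · rw [List.append_assoc]
        congr 1
        have : (PySem.Int.floordiv (t - 4) 4 + 1).toNat
             = (PySem.Int.floordiv (t - 4) 4).toNat + 1 := by omega
        rw [this, List.replicate_succ]
        rfl
      · ring
  | case2 t c h =>
      rw [getCoinsLoop4, if_neg h]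
      have h0 : PySem.Int.floordiv (max t 0) 4 = 0 := by
        rw [PySem.Int.floordiv_eq_ediv_of_pos (by omega)]; omega
      rw [h0]
      simp

-- ===== VERDICT (by name: the statement is the Claim_ definition above) =====
theorem getCoins_spec : Claim_equal_getCoins := by
  intro target _
  unfold Spec_getCoins getCoins getCoins_alt
  simp only [getCoinsLoop9_spec, getCoinsLoop4_spec]
  simp only [List.nil_append, List.append_assoc, mul_one]
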